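-- pv_equiv track=rewrite | github.com/littlepangding/bangumi_personalized_anime_amway_system | libs/preproc.py | compress_show_ids
-- ===== SOURCE A (Python) =====
-- def compress_show_ids(all_ratings, start_idx=1):
--     old_to_new = {}
--     new_to_old = {}
--     for _, s, _ in all_ratings:
--         if s in old_to_new:
--             continue
--         new_id = len(old_to_new) + start_idx
--         old_to_new[s] = new_id
--         new_to_old[new_id] = s
--     max_id = new_id + 1
--     compressed_ratings = [(u, old_to_new[s], r) for u, s, r in all_ratings]
--     return compressed_ratings, old_to_new, new_to_old, max_id
-- ===== SOURCE B (Python) =====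
-- def compress_show_ids(all_ratings, start_idx=1):
--     # first occurrence index of each show id: a reverse sweep, later writes
--     # (= earlier positions) overwrite, so first[s] ends as the earliest index of s
--     first = {}
--     for i in range(len(all_ratings) - 1, -1, -1):
--         first[all_ratings[i][1]] = i
--     old_to_new = {}
--     new_to_old = {}
--     for rank, s in enumerate(sorted(first, key=first.get)):
--         old_to_new[s] = rank + start_idx
--         new_to_old[rank + start_idx] = s
--     compressed_ratings = [(u, old_to_new[s], r) for u, s, r in all_ratings]
--     return compressed_ratings, old_to_new, new_to_old, len(first) + start_idx
-- ===== Notes on version B (the rewrite author's own statement) =====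
-- stated objective: alternative
-- what changed: Replaces A's single membership-guarded dedup-and-number pass by a three-stage algorithm: a reverse index sweep whose overwriting dict writes record each show id's first-occurrence position, a sort of the ids by that position, and then a guard-free numbering loop over the sorted ids.
import Mathlib
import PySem

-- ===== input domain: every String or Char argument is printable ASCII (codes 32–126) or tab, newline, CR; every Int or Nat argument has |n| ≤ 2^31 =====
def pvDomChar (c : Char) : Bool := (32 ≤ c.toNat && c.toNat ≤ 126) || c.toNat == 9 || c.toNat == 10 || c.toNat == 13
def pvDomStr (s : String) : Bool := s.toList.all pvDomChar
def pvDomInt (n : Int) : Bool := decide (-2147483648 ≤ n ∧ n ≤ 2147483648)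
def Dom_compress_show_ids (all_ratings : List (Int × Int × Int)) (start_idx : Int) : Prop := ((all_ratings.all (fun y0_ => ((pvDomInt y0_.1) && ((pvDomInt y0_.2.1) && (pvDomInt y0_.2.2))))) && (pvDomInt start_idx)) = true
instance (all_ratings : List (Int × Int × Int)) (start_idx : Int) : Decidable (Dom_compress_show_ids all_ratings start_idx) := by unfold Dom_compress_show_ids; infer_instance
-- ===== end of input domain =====

-- B replaces A's membership-guarded single dedup-and-number pass by a different algorithm: a reverse
-- index sweep that records each show id's first-occurrence position, then a sort of the ids by that
-- position, then numbering (alternative; O(n log n) vs A's O(n)); equal on all non-empty inputs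
-- (on [] A raises NameError, excluded by Pre_, where B returns ([], {}, {}, start_idx)).


-- ===== PORT A =====
-- the loop body: membership-guarded insertion into both dicts; new_id is Option Int
-- (none = 'new_id' was never assigned, where Python's final 'new_id + 1' raises NameError)
def pvAStep (start_idx : Int)
    (st : PySem.Dict Int Int × PySem.Dict Int Int × Option Int) (t : Int × Int × Int) :
    PySem.Dict Int Int × PySem.Dict Int Int × Option Int :=
  if st.1.contains t.2.1 then st
  else
    let new_id : Int := (st.1.size : Int) + start_idx
    (st.1.insert t.2.1 new_id, st.2.1.insert new_id t.2.1, some new_id)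

def compress_show_ids (all_ratings : List (Int × Int × Int)) (start_idx : Int) :
    (List (Int × Int × Int)) × (List (Int × Int)) × (List (Int × Int)) × Int :=
  let st := all_ratings.foldl (pvAStep start_idx) (PySem.Dict.empty, PySem.Dict.empty, none)
  -- 'max_id = new_id + 1': defined only when the loop assigned new_id (all_ratings ≠ [], Pre_);
  -- the getD default is never reached inside Pre_
  let max_id : Int := st.2.2.getD (start_idx - 1) + 1
  -- old_to_new[s] is always present, so the total getD is exact
  let compressed := all_ratings.map (fun t => (t.1, st.1.getD t.2.1 0, t.2.2))
  (compressed, st.1.items, st.2.1.items, max_id)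

-- ===== PORT B =====
def compress_show_ids_alt (all_ratings : List (Int × Int × Int)) (start_idx : Int) :
    (List (Int × Int × Int)) × (List (Int × Int)) × (List (Int × Int)) × Int :=
  -- for i in range(len(all_ratings)-1, -1, -1): first[all_ratings[i][1]] = i
  -- (the loop index is always in range, so the total pyGetD is exact)
  let first : PySem.Dict Int Int :=
    (PySem.List.pyRange ((all_ratings.length : Int) - 1) (-1) (-1)).foldl
      (fun d i => d.insert (PySem.List.pyGetD all_ratings i (0, 0, 0)).2.1 i) PySem.Dict.empty
  -- sorted(first, key=first.get): iteration over the dict is its keys; every key is present,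
  -- so the total getD is first.get exactly
  let order := PySem.List.sorted first.keys (fun s => first.getD s 0)
  -- for rank, s in enumerate(order): old_to_new[s] = rank+start_idx; new_to_old[rank+start_idx] = s
  let st := (PySem.List.enumerate order 0).foldl
      (fun (st : PySem.Dict Int Int × PySem.Dict Int Int) p =>
        (st.1.insert p.2 (p.1 + start_idx), st.2.insert (p.1 + start_idx) p.2))
      (PySem.Dict.empty, PySem.Dict.empty)
  let compressed := all_ratings.map (fun t => (t.1, st.1.getD t.2.1 0, t.2.2))
  (compressed, st.1.items, st.2.items, (first.size : Int) + start_idx)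

-- ===== PRECONDITION & SPEC =====
-- Pre_ excludes only the empty list, on which A raises NameError (new_id never assigned).
def Pre_compress_show_ids (all_ratings : List (Int × Int × Int)) (start_idx : Int) : Prop :=
  all_ratings ≠ []
instance (all_ratings : List (Int × Int × Int)) (start_idx : Int) : Decidable (Pre_compress_show_ids all_ratings start_idx) := by unfold Pre_compress_show_ids; infer_instance

def pvWitness_compress_show_ids : (List (Int × Int × Int)) × Int := ([(1, 7, 10), (2, 7, 5), (1, 3, 8)], 1)

def Spec_compress_show_ids (all_ratings : List (Int × Int × Int)) (start_idx : Int) (out : (List (Int × Int × Int)) × (List (Int × Int)) × (List (Int × Int)) × Int) : Prop := out = compress_show_ids_alt all_ratings start_idx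
instance (all_ratings : List (Int × Int × Int)) (start_idx : Int) (out : (List (Int × Int × Int)) × (List (Int × Int)) × (List (Int × Int)) × Int) : Decidable (Spec_compress_show_ids all_ratings start_idx out) := by unfold Spec_compress_show_ids; infer_instance

-- ===== CLAIM (what is proved, stated in full; the proofs are below) =====
def Claim_equal_compress_show_ids : Prop := ∀ (all_ratings : List (Int × Int × Int)) (start_idx : Int), Dom_compress_show_ids all_ratings start_idx → Pre_compress_show_ids all_ratings start_idx → Spec_compress_show_ids all_ratings start_idx (compress_show_ids all_ratings start_idx)

-- ===== LEMMAS AND PROOFS =====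

-- === shared target shapes: the two mapping dicts over the unique ids U, and A's last-assigned id ===
def pvOIt (start_idx : Int) (u : List Int) : List (Int × Int) :=
  (PySem.List.enumerate u 0).map (fun p => (p.2, p.1 + start_idx))
def pvNIt (start_idx : Int) (u : List Int) : List (Int × Int) :=
  (PySem.List.enumerate u 0).map (fun p => (p.1 + start_idx, p.2))
def pvLast (start_idx : Int) (u : List Int) : Option Int :=
  if u = [] then none else some ((u.length : Int) - 1 + start_idx)

lemma pvOIt_fst (start_idx : Int) (u : List Int) :
    (pvOIt start_idx u).map (·.1) = u := by
  simp [pvOIt, List.map_map, Function.comp_def, PySem.List.map_snd_enumerate]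

lemma pvO_contains (start_idx : Int) (u : List Int) (s : Int) :
    (PySem.Dict.mk (pvOIt start_idx u)).contains s = decide (s ∈ u) := by
  rw [PySem.Dict.contains_eq_decide_mem_keys]
  simp [PySem.Dict.keys, pvOIt_fst]

lemma pvN_not_contains (start_idx : Int) (u : List Int) :
    (PySem.Dict.mk (pvNIt start_idx u)).contains ((u.length : Int) + start_idx) = false := by
  rw [PySem.Dict.contains_eq_decide_mem_keys]
  simp only [PySem.Dict.keys, pvNIt, List.map_map, decide_eq_false_iff_not]
  intro h
  obtain ⟨p, hp, hep⟩ := List.mem_map.mp h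
  obtain ⟨k, hk, rfl⟩ := (PySem.List.mem_enumerate_iff _ _ _).mp hp
  simp at hep
  omega

lemma pvOIt_append (start_idx : Int) (u : List Int) (s : Int) :
    pvOIt start_idx (u ++ [s]) = pvOIt start_idx u ++ [(s, (u.length : Int) + start_idx)] := by
  simp [pvOIt, PySem.List.enumerate_append, PySem.List.enumerate_cons, PySem.List.enumerate_nil]

lemma pvNIt_append (start_idx : Int) (u : List Int) (s : Int) :
    pvNIt start_idx (u ++ [s]) = pvNIt start_idx u ++ [((u.length : Int) + start_idx, s)] := by
  simp [pvNIt, PySem.List.enumerate_append, PySem.List.enumerate_cons, PySem.List.enumerate_nil]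

lemma pvO_size (start_idx : Int) (u : List Int) :
    (PySem.Dict.mk (pvOIt start_idx u)).size = u.length := by
  simp [PySem.Dict.size, pvOIt, PySem.List.length_enumerate]

-- === A side: loop invariant — A's fold from the state for uniques u lands on the state for u.update(shown ids) ===
lemma pvLoop_inv (start_idx : Int) :
    ∀ (xs : List (Int × Int × Int)) (u : List Int),
      xs.foldl (pvAStep start_idx)
        (PySem.Dict.mk (pvOIt start_idx u), PySem.Dict.mk (pvNIt start_idx u), pvLast start_idx u)
      = (PySem.Dict.mk (pvOIt start_idx (PySem.Set.update u (xs.map (fun t => t.2.1)))),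
         PySem.Dict.mk (pvNIt start_idx (PySem.Set.update u (xs.map (fun t => t.2.1)))),
         pvLast start_idx (PySem.Set.update u (xs.map (fun t => t.2.1)))) := by
  intro xs
  induction xs with
  | nil => intro u; simp [PySem.Set.update]
  | cons t ts ih =>
    intro u
    rw [List.map_cons, PySem.Set.update_cons, List.foldl_cons]
    by_cases hs : t.2.1 ∈ u
    · rw [PySem.Set.add_of_mem hs]
      have hoc : (PySem.Dict.mk (pvOIt start_idx u)).contains t.2.1 = true := by
        rw [pvO_contains]; simp [hs]
      have hstep : pvAStep start_idx
          (PySem.Dict.mk (pvOIt start_idx u), PySem.Dict.mk (pvNIt start_idx u), pvLast start_idx u) t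
          = (PySem.Dict.mk (pvOIt start_idx u), PySem.Dict.mk (pvNIt start_idx u), pvLast start_idx u) := by
        simp only [pvAStep, hoc, if_true]
      rw [hstep]; exact ih u
    · rw [PySem.Set.add_of_not_mem hs]
      have hins : pvAStep start_idx
          (PySem.Dict.mk (pvOIt start_idx u), PySem.Dict.mk (pvNIt start_idx u), pvLast start_idx u) t
          = (PySem.Dict.mk (pvOIt start_idx (u ++ [t.2.1])),
             PySem.Dict.mk (pvNIt start_idx (u ++ [t.2.1])),
             pvLast start_idx (u ++ [t.2.1])) := by
        have hoc : (PySem.Dict.mk (pvOIt start_idx u)).contains t.2.1 = false := by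
          rw [pvO_contains]; simp [hs]
        have hO : (PySem.Dict.mk (pvOIt start_idx u)).insert t.2.1 ((u.length : Int) + start_idx)
            = PySem.Dict.mk (pvOIt start_idx (u ++ [t.2.1])) := by
          apply PySem.Dict.ext
          rw [PySem.Dict.items_insert_of_not_contains _ _ hoc, pvOIt_append]
        have hN : (PySem.Dict.mk (pvNIt start_idx u)).insert ((u.length : Int) + start_idx) t.2.1
            = PySem.Dict.mk (pvNIt start_idx (u ++ [t.2.1])) := by
          apply PySem.Dict.ext
          rw [PySem.Dict.items_insert_of_not_contains _ _ (pvN_not_contains start_idx u), pvNIt_append]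
        have hlast : pvLast start_idx (u ++ [t.2.1]) = some ((u.length : Int) + start_idx) := by
          simp only [pvLast, List.append_eq_nil_iff, List.cons_ne_nil, and_false, if_false]
          congr 1
          simp only [List.length_append, List.length_cons, List.length_nil]
          push_cast
          ring
        simp only [pvAStep, hoc, Bool.false_eq_true, if_false, pvO_size]
        rw [hO, hN, hlast]
      rw [hins]; exact ih (u ++ [t.2.1])

-- === B side: the reverse sweep dict ===
-- first-occurrence position: pvFA ss a s = a + (index of the first occurrence of s in ss), none if absent
def pvFA (ss : List Int) (a : Int) (s : Int) : Option Int :=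
  match ss with
  | [] => none
  | x :: t => if x = s then some a else pvFA t (a + 1) s

lemma pvFA_eq_none (ss : List Int) (a s : Int) : pvFA ss a s = none ↔ s ∉ ss := by
  induction ss generalizing a with
  | nil => simp [pvFA]
  | cons x t ih =>
    by_cases hx : x = s
    · simp [pvFA, hx]
    · simp [pvFA, hx, ih, Ne.symm hx]

lemma pvFA_lower (ss : List Int) (a s : Int) (h : s ∈ ss) :
    ∃ k, pvFA ss a s = some k ∧ a ≤ k := by
  induction ss generalizing a with
  | nil => simp at h
  | cons x t ih =>
    by_cases hx : x = s
    · exact ⟨a, by simp [pvFA, hx], le_refl a⟩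
    · have hm : s ∈ t := by cases List.mem_cons.mp h with
        | inl h' => exact absurd h'.symm hx
        | inr h' => exact h'
      obtain ⟨k, hk, hle⟩ := ih (a + 1) hm
      exact ⟨k, by simp [pvFA, hx, hk], by omega⟩

-- the foldr of overwriting inserts from enumerate: the FIRST occurrence's index wins
def pvFR (ss : List Int) (a : Int) : PySem.Dict Int Int :=
  (PySem.List.enumerate ss a).foldr (fun p d => d.insert p.2 p.1) PySem.Dict.empty

lemma pvFR_get (ss : List Int) (a s : Int) : (pvFR ss a).get? s = pvFA ss a s := by
  induction ss generalizing a with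
  | nil => simp [pvFR, pvFA, PySem.List.enumerate_nil, PySem.Dict.get?_empty]
  | cons x t ih =>
    rw [pvFR, PySem.List.enumerate_cons, List.foldr_cons]
    rw [PySem.Dict.get?_insert]
    by_cases hx : x = s
    · simp [pvFA, hx]
    · simp only [pvFA, hx, if_false, if_neg (Ne.symm hx)]
      exact ih (a + 1)

lemma pvFR_nodup_keys (ss : List Int) (a : Int) : (pvFR ss a).keys.Nodup := by
  induction ss generalizing a with
  | nil => simp [pvFR, PySem.List.enumerate_nil, PySem.Dict.keys_empty]
  | cons x t ih =>
    rw [pvFR, PySem.List.enumerate_cons, List.foldr_cons]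
    exact PySem.Dict.nodup_keys_insert _ _ _ (ih (a + 1))

lemma pvFR_mem_keys (ss : List Int) (a s : Int) : s ∈ (pvFR ss a).keys ↔ s ∈ ss := by
  rw [← not_iff_not, ← PySem.Dict.get?_eq_none_iff_not_mem_keys, pvFR_get, pvFA_eq_none]

-- B's reverse index sweep IS pvFR: range(n-1,-1,-1) is the reverse of range(n), and a foldl over a
-- reverse is the foldr
lemma pvFirst_eq_pvFR (xs : List (Int × Int × Int)) :
    (PySem.List.pyRange ((xs.length : Int) - 1) (-1) (-1)).foldl
      (fun d i => d.insert (PySem.List.pyGetD xs i (0, 0, 0)).2.1 i) PySem.Dict.empty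
    = pvFR (xs.map (fun t => t.2.1)) 0 := by
  have hr : PySem.List.pyRange ((xs.length : Int) - 1) (-1) (-1)
      = (PySem.List.pyRange 0 (xs.length : Int) 1).reverse := by
    rw [PySem.List.pyRange_neg_one_eq_reverse]; norm_num
  rw [hr, List.foldl_reverse, pvFR,
      PySem.List.enumerate_eq_map_pyRange (xs.map (fun t => t.2.1)) 0, List.foldr_map]
  simp only [PySem.List.len_eq, List.length_map]
  congr 1
  funext i d
  have : PySem.List.pyGetD (xs.map (fun t => t.2.1)) i 0
      = (PySem.List.pyGetD xs i (0, 0, 0)).2.1 := by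
    have := PySem.List.pyGetD_map (fun t : Int × Int × Int => t.2.1) xs i (0, 0, 0)
    simpa using this
  rw [this]

-- first occurrences are strictly increasing along dedup ss
lemma pvDedup_pairwise (ss : List Int) :
    ∀ a : Int, (PySem.List.dedup ss).Pairwise
      (fun u v => ∃ i j, pvFA ss a u = some i ∧ pvFA ss a v = some j ∧ i < j) := by
  induction ss with
  | nil => intro a; simp [PySem.List.dedup_eq_ofList, PySem.Set.ofList_nil]
  | cons x t ih =>
    intro a
    rw [PySem.List.dedup_eq_ofList, PySem.Set.ofList_cons]
    constructor
    · intro v hv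
      have hv' := (PySem.Set.mem_discard _ _ _).mp hv
      have hvx : v ≠ x := hv'.2
      have hvt : v ∈ t := by
        have := hv'.1
        rw [show PySem.Set.ofList t = PySem.List.dedup t from (PySem.List.dedup_eq_ofList t).symm] at this
        exact (PySem.List.mem_dedup _ _).mp this
      obtain ⟨k, hk, hle⟩ := pvFA_lower t (a + 1) v hvt
      exact ⟨a, k, by simp [pvFA], by simp [pvFA, Ne.symm hvx, hk], by omega⟩
    · have hsub : List.Sublist ((PySem.Set.ofList t).discard x) (PySem.Set.ofList t) := by
        simp only [PySem.Set.discard]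
        exact List.filter_sublist
      have hp : List.Pairwise
          (fun u v => ∃ i j, pvFA t (a + 1) u = some i ∧ pvFA t (a + 1) v = some j ∧ i < j)
          ((PySem.Set.ofList t).discard x) :=
        List.Pairwise.sublist hsub (PySem.List.dedup_eq_ofList t ▸ ih (a + 1))
      refine hp.imp_of_mem ?_
      rintro u v hu hv ⟨i, j, hi, hj, hij⟩
      have hux : u ≠ x := ((PySem.Set.mem_discard _ _ _).mp hu).2
      have hvx : v ≠ x := ((PySem.Set.mem_discard _ _ _).mp hv).2
      exact ⟨i, j, by simp [pvFA, Ne.symm hux, hi], by simp [pvFA, Ne.symm hvx, hj], hij⟩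

-- the sort by first position recovers the first-seen order dedup ss
lemma pvOrder_eq_dedup (ss : List Int) :
    PySem.List.sorted (pvFR ss 0).keys (fun s => (pvFR ss 0).getD s 0) = PySem.List.dedup ss := by
  apply PySem.List.sorted_eq_of_perm_of_pairwise_lt
  · rw [List.perm_ext_iff_of_nodup (PySem.List.nodup_dedup ss) (pvFR_nodup_keys ss 0)]
    intro s
    rw [PySem.List.mem_dedup, pvFR_mem_keys]
  · refine (pvDedup_pairwise ss 0).imp_of_mem ?_
    intro u v _ _ ⟨i, j, hi, hj, hij⟩
    rw [PySem.Dict.getD_eq_get?_getD, PySem.Dict.getD_eq_get?_getD, pvFR_get, pvFR_get, hi, hj]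
    simpa using hij

lemma pvFR_size (ss : List Int) : ((pvFR ss 0).size : Int) = ((PySem.List.dedup ss).length : Int) := by
  have hk : (pvFR ss 0).keys.length = (PySem.List.dedup ss).length := by
    have hperm : (PySem.List.dedup ss).Perm (pvFR ss 0).keys := by
      rw [List.perm_ext_iff_of_nodup (PySem.List.nodup_dedup ss) (pvFR_nodup_keys ss 0)]
      intro s; rw [PySem.List.mem_dedup, pvFR_mem_keys]
    exact hperm.length_eq.symm
  have : (pvFR ss 0).size = (pvFR ss 0).keys.length := by
    simp [PySem.Dict.size, PySem.Dict.keys]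
  rw [this, hk]

-- B's numbering loop over enumerate(order) builds exactly the two target dicts
lemma pvNumber_loop (start_idx : Int) (u : List Int) (hu : u.Nodup) :
    (PySem.List.enumerate u 0).foldl
      (fun (st : PySem.Dict Int Int × PySem.Dict Int Int) p =>
        (st.1.insert p.2 (p.1 + start_idx), st.2.insert (p.1 + start_idx) p.2))
      (PySem.Dict.empty, PySem.Dict.empty)
    = (PySem.Dict.mk (pvOIt start_idx u), PySem.Dict.mk (pvNIt start_idx u)) := by
  refine Eq.trans (PySem.List.foldl_prod_mk
      (fun (d : PySem.Dict Int Int) (p : Int × Int) => d.insert p.2 (p.1 + start_idx))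
      (fun (d : PySem.Dict Int Int) (p : Int × Int) => d.insert (p.1 + start_idx) p.2)
      (PySem.List.enumerate u 0) PySem.Dict.empty PySem.Dict.empty) ?_
  have hO : ((PySem.List.enumerate u 0).foldl
      (fun (d : PySem.Dict Int Int) p => d.insert p.2 (p.1 + start_idx)) PySem.Dict.empty).items
      = pvOIt start_idx u := by
    rw [PySem.Dict.items_foldl_insert_fresh (PySem.List.enumerate u 0)
        (fun p => p.2) (fun p => p.1 + start_idx) PySem.Dict.empty
        (by intro a _; exact PySem.Dict.contains_empty _)
        (by rw [PySem.List.map_snd_enumerate]; exact hu)]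
    simp [pvOIt, PySem.Dict.empty]
  have hN : ((PySem.List.enumerate u 0).foldl
      (fun (d : PySem.Dict Int Int) p => d.insert (p.1 + start_idx) p.2) PySem.Dict.empty).items
      = pvNIt start_idx u := by
    rw [PySem.Dict.items_foldl_insert_fresh (PySem.List.enumerate u 0)
        (fun p => p.1 + start_idx) (fun p => p.2) PySem.Dict.empty
        (by intro a _; exact PySem.Dict.contains_empty _)
        (by
          have : (PySem.List.enumerate u 0).map (fun p => p.1 + start_idx)
              = ((PySem.List.enumerate u 0).map (·.1)).map (fun i => i + start_idx) := by
            simp [List.map_map, Function.comp_def]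
          rw [this, PySem.List.map_fst_enumerate]
          exact (PySem.List.nodup_pyRange_one _ _).map
            (fun a b h => by omega))]
    simp [pvNIt, PySem.Dict.empty]
  exact Prod.ext (PySem.Dict.ext hO) (PySem.Dict.ext hN)

-- B's whole computation, rewritten onto the shared target shapes
lemma pvAlt_closed (xs : List (Int × Int × Int)) (start_idx : Int) :
    compress_show_ids_alt xs start_idx
    = (xs.map (fun t => (t.1,
          (PySem.Dict.mk (pvOIt start_idx (PySem.List.dedup (xs.map (fun t => t.2.1))))).getD t.2.1 0,
          t.2.2)),
       pvOIt start_idx (PySem.List.dedup (xs.map (fun t => t.2.1))),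
       pvNIt start_idx (PySem.List.dedup (xs.map (fun t => t.2.1))),
       ((PySem.List.dedup (xs.map (fun t => t.2.1))).length : Int) + start_idx) := by
  simp only [compress_show_ids_alt]
  rw [pvFirst_eq_pvFR, pvOrder_eq_dedup,
      pvNumber_loop start_idx _ (PySem.List.nodup_dedup _), pvFR_size]

-- ===== VERDICT (by name: the statement is the Claim_ definition above) =====
theorem compress_show_ids_spec : Claim_equal_compress_show_ids := by
  unfold Claim_equal_compress_show_ids
  intro xs start_idx _ hpre
  unfold Spec_compress_show_ids compress_show_ids Pre_compress_show_ids at *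
  rw [pvAlt_closed]
  have hinit : (PySem.Dict.empty, PySem.Dict.empty, (none : Option Int))
      = (PySem.Dict.mk (pvOIt start_idx []), PySem.Dict.mk (pvNIt start_idx []), pvLast start_idx []) := by
    simp [pvOIt, pvNIt, pvLast, PySem.List.enumerate_nil, PySem.Dict.empty]
  rw [hinit, pvLoop_inv start_idx xs []]
  have hU : PySem.Set.update [] (xs.map (fun t => t.2.1))
      = PySem.List.dedup (xs.map (fun t => t.2.1)) := by
    simp [PySem.Set.update_nil_left]
  set U := PySem.List.dedup (xs.map (fun t => t.2.1)) with hUdef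
  rw [hU]
  have hUne : U ≠ [] := by
    cases xs with
    | nil => exact absurd rfl hpre
    | cons t ts =>
      rw [hUdef]
      simp [PySem.List.dedup_eq_ofList, PySem.Set.ofList_cons]
  have hlast : pvLast start_idx U = some ((U.length : Int) - 1 + start_idx) := by
    simp [pvLast, hUne]
  simp only [hlast, Option.getD_some]
  refine Prod.ext rfl (Prod.ext rfl (Prod.ext rfl ?_))
  ring
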